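-- pv_equiv track=rewrite | github.com/lmmsoft/LeetCode | LeetCode-Algorithm/1191. K-Concatenation Maximum Sum/1191.py | kConcatenationMaxSum1
-- ===== SOURCE A (Python) =====
-- from typing import List
--
-- def kConcatenationMaxSum1(arr: List[int], k: int) -> int:
--     def max_sub(arr: List[int]):
--         pos = []
--         p_min = -1
--         s = 0
--         s_min = 0
--         s_max = -float("inf")
--         for p, a in enumerate(arr):
--             s += a
--             if s - s_min > s_max:
--                 pos = [(p_min, p)]
--                 s_max = s - s_min
--             elif s - s_min == s_max:
--                 pos.append((p_min, p))
--
--             if s < s_min: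
--                 s_min = s
--                 p_min = p
--
--         if s - s_min > s_max:
--             pos = [(p_min, len(arr) - 1)]
--             s_max = s - s_min
--         elif s - s_min == s_max:
--             pos.append((p_min, len(arr) - 1))
--
--         return s_max, pos
--
--     if k == 1:
--         s, pos = max_sub(arr)
--     elif k == 2:
--         s, pos = max_sub(arr * 2)
--     else:
--         s, pos = max_sub(arr * 2)
--         s1 = sum(arr)
--         if s1 <= 0:
--             pass
--         else:
--             found = False
--             l = len(arr)
--             for a, b in pos:
--                 if a < l and b >= l:
--                     found = True
--             if found:
--                 s = s + (k - 2) * s1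
--             else:
--                 pass
--
--     return s % (10 ** 9 + 7)
-- ===== SOURCE B (Python) =====
-- from typing import List
--
-- def kConcatenationMaxSum1(arr: List[int], k: int) -> int:
--     MOD = 10 ** 9 + 7
--
--     def kadane(a: List[int]) -> int:
--         best = cur = 0
--         for x in a:
--             cur = max(0, cur + x)
--             best = max(best, cur)
--         return best
--
--     if k == 1:
--         return kadane(arr) % MOD
--     s = sum(arr)
--     two = kadane(arr * 2)
--     if s > 0:
--         two += (k - 2) * s
--     return two % MOD
-- ===== Notes on version B (the rewrite author's own statement) =====
-- stated objective: simpler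
-- what changed: B replaces A's prefix-minimum scan with position/boundary-span bookkeeping (pos list, p_min tracking, found scan) by a plain running Kadane allowing the empty subarray plus a provably equivalent sum>0 test for adding (k-2)*sum.
import Mathlib
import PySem

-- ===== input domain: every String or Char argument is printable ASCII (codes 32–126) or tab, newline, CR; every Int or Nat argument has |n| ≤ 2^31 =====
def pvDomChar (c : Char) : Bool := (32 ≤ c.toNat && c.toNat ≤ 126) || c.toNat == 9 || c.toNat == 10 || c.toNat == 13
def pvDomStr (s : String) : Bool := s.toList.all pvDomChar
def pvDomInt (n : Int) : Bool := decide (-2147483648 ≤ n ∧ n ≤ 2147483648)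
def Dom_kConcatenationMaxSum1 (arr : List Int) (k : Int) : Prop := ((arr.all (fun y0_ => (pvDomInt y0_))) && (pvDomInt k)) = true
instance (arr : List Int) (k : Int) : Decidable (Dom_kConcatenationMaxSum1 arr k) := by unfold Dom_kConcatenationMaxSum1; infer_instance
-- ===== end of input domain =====

-- B replaces A's prefix-minimum/position bookkeeping with a plain running Kadane plus a `sum > 0` test
-- (objective: simpler); proved to return A's exact value on every input.

-- ===== PORT A =====
-- Python's s_max starts at -float("inf"); ported exactly as `none` (any Int compares > none, none = none to nothing).
def pvGtOpt (x : Int) (m : Option Int) : Bool :=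
  match m with
  | none => true
  | some v => decide (v < x)

def pvEqOpt (x : Int) (m : Option Int) : Bool :=
  match m with
  | none => false
  | some v => decide (x = v)

-- the `for p, a in enumerate(arr)` loop of max_sub, state (pos, p_min, s, s_min, s_max)
def pvMaxSubLoop (rest : List Int) (p : Int) (pos : List (Int × Int)) (pMin s sMin : Int)
    (sMax : Option Int) : List (Int × Int) × Int × Int × Int × Option Int :=
  match rest with
  | [] => (pos, pMin, s, sMin, sMax)
  | a :: t =>
    let s' := s + a
    let pos' := if pvGtOpt (s' - sMin) sMax then [(pMin, p)]
                else if pvEqOpt (s' - sMin) sMax then pos ++ [(pMin, p)] else pos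
    let sMax' := if pvGtOpt (s' - sMin) sMax then some (s' - sMin) else sMax
    let sMin' := if s' < sMin then s' else sMin
    let pMin' := if s' < sMin then p else pMin
    pvMaxSubLoop t (p + 1) pos' pMin' s' sMin' sMax'

-- max_sub: loop, then the trailing boundary check; returns (s_max, pos)
def pvMaxSub (xs : List Int) : Int × List (Int × Int) :=
  match pvMaxSubLoop xs 0 [] (-1) 0 0 none with
  | (pos, pMin, s, sMin, sMax) =>
    let pos' := if pvGtOpt (s - sMin) sMax then [(pMin, (xs.length : Int) - 1)]
                else if pvEqOpt (s - sMin) sMax then pos ++ [(pMin, (xs.length : Int) - 1)] else pos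
    let sMax' := if pvGtOpt (s - sMin) sMax then some (s - sMin) else sMax
    match sMax' with
    | some v => (v, pos')
    | none => (0, pos')  -- unreachable: the final comparison always sets s_max

-- the `for a, b in pos` scan setting found
def pvFoundLoop (pos : List (Int × Int)) (l : Int) (found : Bool) : Bool :=
  match pos with
  | [] => found
  | (a, b) :: t => pvFoundLoop t l (if a < l ∧ b ≥ l then true else found)

def kConcatenationMaxSum1 (arr : List Int) (k : Int) : Int :=
  if k = 1 then
    PySem.Int.mod (pvMaxSub arr).1 (10 ^ 9 + 7)
  else if k = 2 then
    PySem.Int.mod (pvMaxSub (arr ++ arr)).1 (10 ^ 9 + 7)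
  else
    let r := pvMaxSub (arr ++ arr)
    let s1 := arr.sum
    let s := if s1 ≤ 0 then r.1
             else if pvFoundLoop r.2 (arr.length : Int) false then r.1 + (k - 2) * s1 else r.1
    PySem.Int.mod s (10 ^ 9 + 7)

-- ===== PORT B =====
def pvKStep (bc : Int × Int) (x : Int) : Int × Int :=
  let cur := max 0 (bc.2 + x)
  (max bc.1 cur, cur)

def pvKadane (a : List Int) : Int :=
  (a.foldl pvKStep ((0 : Int), (0 : Int))).1

def kConcatenationMaxSum1_alt (arr : List Int) (k : Int) : Int :=
  if k = 1 then PySem.Int.mod (pvKadane arr) (10 ^ 9 + 7)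
  else
    let s := arr.sum
    let two := pvKadane (arr ++ arr)
    let two' := if s > 0 then two + (k - 2) * s else two
    PySem.Int.mod two' (10 ^ 9 + 7)

-- ===== PRECONDITION & SPEC =====
def Spec_kConcatenationMaxSum1 (arr : List Int) (k : Int) (out : Int) : Prop := out = kConcatenationMaxSum1_alt arr k
instance (arr : List Int) (k : Int) (out : Int) : Decidable (Spec_kConcatenationMaxSum1 arr k out) := by unfold Spec_kConcatenationMaxSum1; infer_instance

-- ===== CLAIM (what is proved, stated in full; the proofs are below) =====
def Claim_equal_kConcatenationMaxSum1 : Prop := ∀ (arr : List Int) (k : Int), Dom_kConcatenationMaxSum1 arr k → Spec_kConcatenationMaxSum1 arr k (kConcatenationMaxSum1 arr k)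

-- ===== LEMMAS AND PROOFS =====

-- max(0, s_max) with none = -inf
def omax0 : Option Int → Int
  | none => 0
  | some m => max 0 m

-- joint invariant between A's loop and B's Kadane fold: same s_max (floored at 0)
theorem loop_kadane (rest : List Int) :
    ∀ (p : Int) (pos : List (Int × Int)) (pMin s sMin : Int) (sMax : Option Int)
      (best cur : Int), sMin ≤ s → cur = s - sMin → best = omax0 sMax → cur ≤ best →
    (match pvMaxSubLoop rest p pos pMin s sMin sMax with
     | (_, _, s', sMin', sMax') =>
       let r := rest.foldl pvKStep (best, cur)
       sMin' ≤ s' ∧ r.2 = s' - sMin' ∧ r.1 = omax0 sMax' ∧ r.2 ≤ r.1) := by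
  induction rest with
  | nil =>
    intro p pos pMin s sMin sMax best cur h1 h2 h3 h4
    simpa [pvMaxSubLoop] using ⟨h1, h2, h3, h4⟩
  | cons a t ih =>
    intro p pos pMin s sMin sMax best cur h1 h2 h3 h4
    simp only [pvMaxSubLoop, List.foldl_cons]
    have hstep : pvKStep (best, cur) a = (max best (max 0 (cur + a)), max 0 (cur + a)) := by
      simp [pvKStep]
    rw [hstep]
    rcases sMax with _ | m
    · simp only [pvGtOpt, if_true]
      apply ih
      · split <;> omega
      · simp [omax0] at h3; split <;> omega
      · simp [omax0] at h3 ⊢; omega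
      · exact le_max_right _ _
    · by_cases hgt : m < s + a - sMin
      · simp only [pvGtOpt, decide_eq_true_eq, if_pos hgt]
        apply ih
        · split <;> omega
        · split <;> omega
        · simp [omax0] at h3 ⊢; omega
        · exact le_max_right _ _
      · simp only [pvGtOpt, decide_eq_true_eq, if_neg hgt]
        apply ih
        · split <;> omega
        · split <;> omega
        · simp [omax0] at h3 ⊢; omega
        · exact le_max_right _ _

-- A's max_sub returns B's kadane value
theorem maxsub_eq_kadane (xs : List Int) : (pvMaxSub xs).1 = pvKadane xs := by
  have h := loop_kadane xs 0 [] (-1) 0 0 none 0 0 le_rfl (by ring) (by simp [omax0]) le_rfl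
  unfold pvMaxSub pvKadane
  rcases hE : pvMaxSubLoop xs 0 [] (-1) 0 0 none with ⟨pos, pMin, s, sMin, sMax⟩
  rw [hE] at h
  obtain ⟨h1, h2, h3, h4⟩ := h
  rcases sMax with _ | m
  · simp only [pvGtOpt, if_true]
    simp [omax0] at h3
    omega
  · simp only [pvGtOpt, decide_eq_true_eq]
    simp [omax0] at h3
    by_cases hgt : m < s - sMin
    · simp only [if_pos hgt]; omega
    · simp only [if_neg hgt]
      omega

-- prefix sums
def pref (ys : List Int) (j : Int) : Int := (ys.take j.toNat).sum

theorem pref_append_le (l1 l2 : List Int) (j : Int) (h : j ≤ (l1.length : Int)) :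
    pref (l1 ++ l2) j = pref l1 j := by
  unfold pref
  have hle : j.toNat ≤ l1.length := by omega
  rw [List.take_append, Nat.sub_eq_zero_of_le hle]
  simp

theorem pref_append_ge (l1 l2 : List Int) (j : Int) (h : 0 ≤ j) :
    pref (l1 ++ l2) ((l1.length : Int) + j) = l1.sum + pref l2 j := by
  unfold pref
  have ht : ((l1.length : Int) + j).toNat = l1.length + j.toNat := by omega
  rw [ht, List.take_append, List.take_of_length_le (by omega),
    Nat.add_sub_cancel_left, List.sum_append]

theorem pref_length (l : List Int) : pref l (l.length : Int) = l.sum := by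
  simp [pref]

-- a maximal-span entry of pos: S_{b+1} - S_{a+1} = m and S_{a+1} minimal among S_0..S_b
def EntryOK (ys : List Int) (m : Int) (n : Int) (ab : Int × Int) : Prop :=
  -1 ≤ ab.1 ∧ ab.1 ≤ ab.2 ∧ ab.2 + 1 ≤ n ∧
  pref ys (ab.2 + 1) - pref ys (ab.1 + 1) = m ∧
  ∀ j : Int, 0 ≤ j → j ≤ ab.2 → pref ys (ab.1 + 1) ≤ pref ys j

-- invariant of A's enumerate loop after i processed elements
def LoopInv (ys : List Int) (i : Int) (pos : List (Int × Int)) (pMin s sMin : Int)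
    (sMax : Option Int) : Prop :=
  0 ≤ i ∧ s = pref ys i ∧ -1 ≤ pMin ∧ pMin + 1 ≤ i ∧ sMin = pref ys (pMin + 1) ∧
  (∀ j : Int, 0 ≤ j → j ≤ i → sMin ≤ pref ys j) ∧
  (match sMax with
   | none => i = 0 ∧ pos = []
   | some m =>
     (∀ q p' : Int, 0 ≤ q → q < p' → p' ≤ i → pref ys p' - pref ys q ≤ m) ∧
     pos ≠ [] ∧ ∀ ab ∈ pos, EntryOK ys m i ab)

-- one iteration of the enumerate loop preserves LoopInv
theorem step_inv (ys : List Int) (i : Int) (pos : List (Int × Int)) (pMin s sMin : Int)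
    (sMax : Option Int) (a : Int) (hInv : LoopInv ys i pos pMin s sMin sMax)
    (hsa : s + a = pref ys (i + 1)) :
    LoopInv ys (i + 1)
      (if pvGtOpt (s + a - sMin) sMax then [(pMin, i)]
       else if pvEqOpt (s + a - sMin) sMax then pos ++ [(pMin, i)] else pos)
      (if s + a < sMin then i else pMin)
      (s + a)
      (if s + a < sMin then s + a else sMin)
      (if pvGtOpt (s + a - sMin) sMax then some (s + a - sMin) else sMax) := by
  obtain ⟨hi0, hs, hpm1, hpm2, hsmin, hmin, hmax⟩ := hInv
  have hq : ∀ q : Int, 0 ≤ q → q ≤ i → pref ys (i + 1) - pref ys q ≤ s + a - sMin := by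
    intro q h0 hqi
    have := hmin q h0 hqi
    omega
  have hNew : EntryOK ys (s + a - sMin) (i + 1) (pMin, i) := by
    refine ⟨hpm1, by omega, by omega, ?_, ?_⟩
    · show pref ys (i + 1) - pref ys (pMin + 1) = s + a - sMin
      rw [← hsa, ← hsmin]
    · intro j hj0 hji
      have h := hmin j hj0 (by omega)
      show pref ys (pMin + 1) ≤ pref ys j
      rwa [hsmin] at h
  have hmono : ∀ m ab, EntryOK ys m i ab → EntryOK ys m (i + 1) ab := by
    intro m ab h
    obtain ⟨e1, e2, e3, e4, e5⟩ := h
    exact ⟨e1, e2, by omega, e4, e5⟩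
  have hminInv : ∀ pm sm : Int,
      (pm = i ∧ sm = s + a ∧ s + a < sMin ∨ pm = pMin ∧ sm = sMin ∧ ¬ s + a < sMin) →
      -1 ≤ pm ∧ pm + 1 ≤ i + 1 ∧ sm = pref ys (pm + 1) ∧
        ∀ j : Int, 0 ≤ j → j ≤ i + 1 → sm ≤ pref ys j := by
    rintro pm sm (⟨hpm, hsm, hlt⟩ | ⟨hpm, hsm, hlt⟩)
    · refine ⟨by omega, by omega, by rw [hsm, hpm]; exact hsa, ?_⟩
      intro j h0 hj
      by_cases hji : j ≤ i
      · have := hmin j h0 hji; omega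
      · have hj1 : j = i + 1 := by omega
        rw [hj1, ← hsa]; omega
    · refine ⟨by omega, by omega, by rw [hsm, hpm]; exact hsmin, ?_⟩
      intro j h0 hj
      by_cases hji : j ≤ i
      · have := hmin j h0 hji; omega
      · have hj1 : j = i + 1 := by omega
        rw [hj1, ← hsa]; omega
  rcases sMax with _ | m
  · -- s_max = -inf : the > branch is taken; also i = 0, pos = []
    obtain ⟨hie, hpe⟩ := hmax
    have hgtt : pvGtOpt (s + a - sMin) none = true := rfl
    simp only [hgtt, if_true]
    have hmat : (∀ q p' : Int, 0 ≤ q → q < p' → p' ≤ i + 1 →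
        pref ys p' - pref ys q ≤ s + a - sMin) ∧
        ([((pMin : Int), (i : Int))] ≠ []) ∧
        (∀ ab ∈ [((pMin : Int), (i : Int))], EntryOK ys (s + a - sMin) (i + 1) ab) := by
      refine ⟨?_, by simp, ?_⟩
      · intro q p' h0 hqp hp
        have hp1 : p' = i + 1 := by omega
        rw [hp1]
        exact hq q h0 (by omega)
      · intro ab hab
        have : ab = (pMin, i) := by simpa using hab
        rw [this]; exact hNew
    by_cases hlt : s + a < sMin
    · obtain ⟨c3, c4, c5, c6⟩ := hminInv i (s + a) (Or.inl ⟨rfl, rfl, hlt⟩)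
      simp only [if_pos hlt]
      exact ⟨by omega, hsa, c3, c4, c5, c6, hmat⟩
    · obtain ⟨c3, c4, c5, c6⟩ := hminInv pMin sMin (Or.inr ⟨rfl, rfl, hlt⟩)
      simp only [if_neg hlt]
      exact ⟨by omega, hsa, c3, c4, c5, c6, hmat⟩
  · obtain ⟨hbound, hposne, hentries⟩ := hmax
    by_cases hgt : m < s + a - sMin
    · have hgtt : pvGtOpt (s + a - sMin) (some m) = true := decide_eq_true hgt
      simp only [hgtt, if_true]
      have hmat : (∀ q p' : Int, 0 ≤ q → q < p' → p' ≤ i + 1 →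
          pref ys p' - pref ys q ≤ s + a - sMin) ∧
          ([((pMin : Int), (i : Int))] ≠ []) ∧
          (∀ ab ∈ [((pMin : Int), (i : Int))], EntryOK ys (s + a - sMin) (i + 1) ab) := by
        refine ⟨?_, by simp, ?_⟩
        · intro q p' h0 hqp hp
          by_cases hpi : p' ≤ i
          · have := hbound q p' h0 hqp hpi; omega
          · have hp1 : p' = i + 1 := by omega
            rw [hp1]
            exact hq q h0 (by omega)
        · intro ab hab
          have : ab = (pMin, i) := by simpa using hab
          rw [this]; exact hNew
      by_cases hlt : s + a < sMin
      · obtain ⟨c3, c4, c5, c6⟩ := hminInv i (s + a) (Or.inl ⟨rfl, rfl, hlt⟩)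
        simp only [if_pos hlt]
        exact ⟨by omega, hsa, c3, c4, c5, c6, hmat⟩
      · obtain ⟨c3, c4, c5, c6⟩ := hminInv pMin sMin (Or.inr ⟨rfl, rfl, hlt⟩)
        simp only [if_neg hlt]
        exact ⟨by omega, hsa, c3, c4, c5, c6, hmat⟩
    · have hgtf : pvGtOpt (s + a - sMin) (some m) = false := by
        simp only [pvGtOpt]; simpa using hgt
      simp only [hgtf, Bool.false_eq_true, if_false]
      have hbound' : ∀ q p' : Int, 0 ≤ q → q < p' → p' ≤ i + 1 →
          pref ys p' - pref ys q ≤ m := by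
        intro q p' h0 hqp hp
        by_cases hpi : p' ≤ i
        · exact hbound q p' h0 hqp hpi
        · have hp1 : p' = i + 1 := by omega
          rw [hp1]
          have := hq q h0 (by omega)
          omega
      by_cases heq : s + a - sMin = m
      · have heqt : pvEqOpt (s + a - sMin) (some m) = true := decide_eq_true heq
        simp only [heqt, if_true]
        have hmat : (∀ q p' : Int, 0 ≤ q → q < p' → p' ≤ i + 1 →
            pref ys p' - pref ys q ≤ m) ∧
            (pos ++ [((pMin : Int), (i : Int))] ≠ []) ∧
            (∀ ab ∈ pos ++ [((pMin : Int), (i : Int))], EntryOK ys m (i + 1) ab) := by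
          refine ⟨hbound', by simp, ?_⟩
          intro ab hab
          rcases List.mem_append.mp hab with hold | hnew
          · exact hmono m ab (hentries ab hold)
          · have : ab = (pMin, i) := by simpa using hnew
            rw [this]
            exact heq ▸ hNew
        by_cases hlt : s + a < sMin
        · obtain ⟨c3, c4, c5, c6⟩ := hminInv i (s + a) (Or.inl ⟨rfl, rfl, hlt⟩)
          simp only [if_pos hlt]
          exact ⟨by omega, hsa, c3, c4, c5, c6, hmat⟩
        · obtain ⟨c3, c4, c5, c6⟩ := hminInv pMin sMin (Or.inr ⟨rfl, rfl, hlt⟩)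
          simp only [if_neg hlt]
          exact ⟨by omega, hsa, c3, c4, c5, c6, hmat⟩
      · have heqf : pvEqOpt (s + a - sMin) (some m) = false := by
          simp only [pvEqOpt]; simpa using heq
        simp only [heqf, Bool.false_eq_true, if_false]
        have hmat : (∀ q p' : Int, 0 ≤ q → q < p' → p' ≤ i + 1 →
            pref ys p' - pref ys q ≤ m) ∧ (pos ≠ []) ∧
            (∀ ab ∈ pos, EntryOK ys m (i + 1) ab) :=
          ⟨hbound', hposne, fun ab hab => hmono m ab (hentries ab hab)⟩
        by_cases hlt : s + a < sMin
        · obtain ⟨c3, c4, c5, c6⟩ := hminInv i (s + a) (Or.inl ⟨rfl, rfl, hlt⟩)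
          simp only [if_pos hlt]
          exact ⟨by omega, hsa, c3, c4, c5, c6, hmat⟩
        · obtain ⟨c3, c4, c5, c6⟩ := hminInv pMin sMin (Or.inr ⟨rfl, rfl, hlt⟩)
          simp only [if_neg hlt]
          exact ⟨by omega, hsa, c3, c4, c5, c6, hmat⟩

theorem loop_inv (rest : List Int) :
    ∀ (done : List Int) (ys : List Int) (pos : List (Int × Int)) (pMin s sMin : Int)
      (sMax : Option Int), ys = done ++ rest →
      LoopInv ys (done.length : Int) pos pMin s sMin sMax →
    (match pvMaxSubLoop rest (done.length : Int) pos pMin s sMin sMax with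
     | (pos', pMin', s', sMin', sMax') =>
       LoopInv ys (ys.length : Int) pos' pMin' s' sMin' sMax') := by
  induction rest with
  | nil =>
    intro done ys pos pMin s sMin sMax hys hInv
    simp only [pvMaxSubLoop]
    have hl : (ys.length : Int) = (done.length : Int) := by rw [hys]; simp
    rw [hl]
    exact hInv
  | cons a t ih =>
    intro done ys pos pMin s sMin sMax hys hInv
    have hsa : s + a = pref ys ((done.length : Int) + 1) := by
      have hprefi : pref ys (done.length : Int) = done.sum := by
        rw [hys, pref_append_le done (a :: t) _ (by omega), pref_length]
      have hprefi1 : pref ys ((done.length : Int) + 1) = done.sum + a := by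
        have h1 : pref (a :: t) 1 = a := by simp [pref]
        rw [hys, pref_append_ge done (a :: t) 1 (by norm_num), h1]
      rw [hprefi1, ← hprefi, hInv.2.1]
    have hstep := step_inv ys (done.length : Int) pos pMin s sMin sMax a hInv hsa
    have hcall := ih (done ++ [a]) ys
      (if pvGtOpt (s + a - sMin) sMax then [(pMin, (done.length : Int))]
       else if pvEqOpt (s + a - sMin) sMax then pos ++ [(pMin, (done.length : Int))] else pos)
      (if s + a < sMin then (done.length : Int) else pMin)
      (s + a)
      (if s + a < sMin then s + a else sMin)
      (if pvGtOpt (s + a - sMin) sMax then some (s + a - sMin) else sMax)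
      (by rw [hys]; simp)
    have hlen : (((done ++ [a]).length : Int)) = (done.length : Int) + 1 := by simp
    rw [hlen] at hcall
    simp only [pvMaxSubLoop]
    exact hcall hstep

theorem maxsub_inv (xs : List Int) (hne : xs ≠ []) :
    (pvMaxSub xs).2 ≠ [] ∧
    (∀ q p' : Int, 0 ≤ q → q < p' → p' ≤ (xs.length : Int) →
      pref xs p' - pref xs q ≤ (pvMaxSub xs).1) ∧
    (∀ ab ∈ (pvMaxSub xs).2, EntryOK xs (pvMaxSub xs).1 (xs.length : Int) ab) := by
  have hlp : 0 < xs.length := List.length_pos_iff.mpr hne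
  have h0 : LoopInv xs 0 [] (-1) 0 0 none := by
    refine ⟨le_rfl, by simp [pref], by omega, by omega, by simp [pref], ?_, ⟨rfl, rfl⟩⟩
    intro j hj0 hj
    have : j = 0 := by omega
    simp [this, pref]
  have h := loop_inv xs [] xs [] (-1) 0 0 none (by simp) (by simpa using h0)
  simp only [List.length_nil, Nat.cast_zero] at h
  rcases hE : pvMaxSubLoop xs 0 [] (-1) 0 0 none with ⟨pos, pMin, s, sMin, sMax⟩
  rw [hE] at h
  dsimp only at h
  obtain ⟨hi0, hs, hpm1, hpm2, hsmin, hmin, hmax⟩ := h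
  unfold pvMaxSub
  rw [hE]
  have hNew : EntryOK xs (s - sMin) (xs.length : Int) (pMin, (xs.length : Int) - 1) := by
    refine ⟨hpm1, by omega, by omega, ?_, ?_⟩
    · show pref xs ((xs.length : Int) - 1 + 1) - pref xs (pMin + 1) = s - sMin
      have hnn : (xs.length : Int) - 1 + 1 = (xs.length : Int) := by omega
      rw [hnn, ← hs, ← hsmin]
    · intro j hj0 hji
      have h := hmin j hj0 (by omega)
      show pref xs (pMin + 1) ≤ pref xs j
      rwa [hsmin] at h
  rcases sMax with _ | m
  · obtain ⟨hie, _⟩ := hmax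
    omega
  · obtain ⟨hbound, hposne, hentries⟩ := hmax
    by_cases hgt : m < s - sMin
    · have hgtt : pvGtOpt (s - sMin) (some m) = true := decide_eq_true hgt
      simp only [hgtt, if_true]
      refine ⟨by simp, ?_, ?_⟩
      · intro q p' h0' hqp hp
        have := hbound q p' h0' hqp hp
        omega
      · intro ab hab
        have : ab = (pMin, (xs.length : Int) - 1) := by simpa using hab
        rw [this]; exact hNew
    · have hgtf : pvGtOpt (s - sMin) (some m) = false := by
        simp only [pvGtOpt]; simpa using hgt
      simp only [hgtf, Bool.false_eq_true, if_false]
      by_cases heq : s - sMin = m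
      · have heqt : pvEqOpt (s - sMin) (some m) = true := decide_eq_true heq
        simp only [heqt, if_true]
        refine ⟨by simp, hbound, ?_⟩
        intro ab hab
        rcases List.mem_append.mp hab with hold | hnew
        · exact hentries ab hold
        · have : ab = (pMin, (xs.length : Int) - 1) := by simpa using hnew
          rw [this]
          exact heq ▸ hNew
      · have heqf : pvEqOpt (s - sMin) (some m) = false := by
          simp only [pvEqOpt]; simpa using heq
        simp only [heqf, Bool.false_eq_true, if_false]
        exact ⟨hposne, hbound, hentries⟩

theorem foundLoop_stay (t : List (Int × Int)) (l : Int) : pvFoundLoop t l true = true := by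
  induction t with
  | nil => rfl
  | cons x t ih =>
    cases x with
    | mk a b =>
      simp only [pvFoundLoop]
      split <;> exact ih

theorem foundLoop_true (pos : List (Int × Int)) (l : Int) (f : Bool)
    (h : ∀ ab ∈ pos, ab.1 < l ∧ ab.2 ≥ l) (hne : pos ≠ []) :
    pvFoundLoop pos l f = true := by
  match pos with
  | [] => exact absurd rfl hne
  | (a, b) :: t =>
    have hab := h (a, b) (List.mem_cons_self ..)
    simp only [pvFoundLoop, if_pos (show a < l ∧ b ≥ l from hab)]
    exact foundLoop_stay t l

-- when sum(arr) > 0, every maximal entry of pos (for the doubled array) spans the copy boundary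
theorem found_true (arr : List Int) (hne : arr ≠ []) (hs : 0 < arr.sum) :
    pvFoundLoop (pvMaxSub (arr ++ arr)).2 (arr.length : Int) false = true := by
  have hne2 : arr ++ arr ≠ [] := by simp [hne]
  obtain ⟨hpos, hbound, hent⟩ := maxsub_inv (arr ++ arr) hne2
  have hl1 : (1 : Int) ≤ (arr.length : Int) := by
    have := List.length_pos_iff.mpr hne
    omega
  have hn : ((arr ++ arr).length : Int) = 2 * (arr.length : Int) := by
    simp [List.length_append]; ring
  have per : ∀ j : Int, 0 ≤ j → j ≤ (arr.length : Int) →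
      pref (arr ++ arr) ((arr.length : Int) + j) = arr.sum + pref (arr ++ arr) j := by
    intro j hj0 hjl
    rw [pref_append_ge arr arr j hj0, pref_append_le arr arr j hjl]
  apply foundLoop_true _ _ _ ?_ hpos
  intro ab hab
  obtain ⟨e1, e2, e3, e4, e5⟩ := hent ab hab
  rw [hn] at e3
  constructor
  · -- ab.1 < len(arr)
    by_contra hcon
    push Not at hcon
    have hj0 : (0 : Int) ≤ ab.1 + 1 - (arr.length : Int) := by omega
    have hjl : ab.1 + 1 - (arr.length : Int) ≤ (arr.length : Int) := by omega
    have hper := per (ab.1 + 1 - (arr.length : Int)) hj0 hjl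
    have harg : (arr.length : Int) + (ab.1 + 1 - (arr.length : Int)) = ab.1 + 1 := by ring
    rw [harg] at hper
    have hmin := e5 (ab.1 + 1 - (arr.length : Int)) hj0 (by omega)
    omega
  · -- ab.2 ≥ len(arr)
    by_contra hcon
    push Not at hcon
    have hb : ab.2 + 1 ≤ (arr.length : Int) := by omega
    have hper := per (ab.2 + 1) (by omega) hb
    have hb2 := hbound (ab.1 + 1) (ab.2 + 1 + (arr.length : Int)) (by omega) (by omega)
      (by omega)
    have harg : (arr.length : Int) + (ab.2 + 1) = ab.2 + 1 + (arr.length : Int) := by ring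
    rw [harg] at hper
    omega

-- ===== VERDICT (by name: the statement is the Claim_ definition above) =====
theorem kConcatenationMaxSum1_spec : Claim_equal_kConcatenationMaxSum1 := by
  intro arr k _
  unfold Spec_kConcatenationMaxSum1 kConcatenationMaxSum1 kConcatenationMaxSum1_alt
  by_cases hk1 : k = 1
  · simp [hk1, maxsub_eq_kadane]
  · by_cases hk2 : k = 2
    · simp only [hk2, if_true, if_neg (by norm_num : ¬ (2 : Int) = 1)]
      rw [maxsub_eq_kadane]
      split
      · norm_num
      · rfl
    · simp only [if_neg hk1, if_neg hk2]
      by_cases hs0 : arr.sum ≤ 0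
      · rw [if_pos hs0, if_neg (by omega : ¬ arr.sum > 0), maxsub_eq_kadane]
      · have hpos : 0 < arr.sum := by omega
        have hne : arr ≠ [] := by
          rintro rfl
          simp at hpos
        rw [if_neg hs0, if_pos (found_true arr hne hpos), if_pos (by omega : arr.sum > 0),
          maxsub_eq_kadane]
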